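-- pv_equiv track=rewrite | github.com/c-paras/ThesisManagementSystem | app/manage_topics.py | clean_topic_tuples
-- ===== SOURCE A (Python) =====
-- def clean_topic_tuples(curr_topics):
--     topic_dict = dict()
--     visible = []
--     topic_id = []
--
--     for topic in curr_topics:
--
--         # if it's in the dict, append values only
--         if topic[0] in topic_dict:
--             topic_dict[topic[0]] = topic_dict[topic[0]] + ', ' + topic[1]
--
--         # if it's not in the dict, create the entry
--         else:
--             topic_dict[topic[0]] = topic[1]
--             visible.append(topic[2])
--             topic_id.append(topic[3])
--
--     return list(zip(list(topic_dict.keys()),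
--                     list(topic_dict.values()),
--                     visible, topic_id))
-- ===== SOURCE B (Python) =====
-- def clean_topic_tuples(curr_topics):
--     # Stage 1: distinct keys in first-occurrence order.
--     # Stage 2: for each key, rebuild its row from the whole input list:
--     # join all its descriptions and take visible/topic_id from its first tuple.
--     seen = []
--     for t in curr_topics:
--         if t[0] not in seen:
--             seen.append(t[0])
--     return [(k,
--              ', '.join(t[1] for t in curr_topics if t[0] == k),
--              next(t[2] for t in curr_topics if t[0] == k),
--              next(t[3] for t in curr_topics if t[0] == k))
--             for k in seen]
-- ===== Notes on version B (the rewrite author's own statement) =====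
-- stated objective: alternative
-- what changed: Replaces A's single pass that accumulates concatenations in a dict plus two parallel lists and a final four-way zip with a staged group-by: one pass collects distinct keys, then each output row is produced independently by filtering the whole input for that key, joining its descriptions and taking visible/topic_id from its first occurrence.
import Mathlib
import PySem

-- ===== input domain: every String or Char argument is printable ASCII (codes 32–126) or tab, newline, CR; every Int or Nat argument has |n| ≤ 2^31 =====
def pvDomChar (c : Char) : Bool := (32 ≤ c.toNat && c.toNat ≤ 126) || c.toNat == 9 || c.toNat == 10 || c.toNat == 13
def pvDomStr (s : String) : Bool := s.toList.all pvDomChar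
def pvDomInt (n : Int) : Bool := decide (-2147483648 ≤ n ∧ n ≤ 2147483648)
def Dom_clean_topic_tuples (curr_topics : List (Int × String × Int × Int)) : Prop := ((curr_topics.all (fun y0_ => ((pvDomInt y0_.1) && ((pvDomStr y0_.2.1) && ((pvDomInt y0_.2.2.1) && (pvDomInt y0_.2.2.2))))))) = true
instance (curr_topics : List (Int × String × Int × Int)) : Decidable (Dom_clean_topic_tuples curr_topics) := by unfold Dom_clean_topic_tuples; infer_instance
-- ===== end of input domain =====

-- B replaces A's one-pass dict-of-concatenations + two parallel lists + final four-way
-- zip by a staged group-by: collect distinct keys, then build each row by per-key scans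
-- over the whole input (objective: alternative; same results, different strategy).

-- ===== PORT A =====
-- Python zip over four lists (truncates at the shortest, as zip does)
def pvZip4 : List Int → List String → List Int → List Int → List (Int × String × Int × Int)
  | k :: ks, d :: ds, v :: vs, t :: ts => (k, d, v, t) :: pvZip4 ks ds vs ts
  | _, _, _, _ => []

-- one iteration of A's for-loop over state (topic_dict, visible, topic_id)
def pvStepA (s : PySem.Dict Int String × List Int × List Int) (topic : Int × String × Int × Int) :
    PySem.Dict Int String × List Int × List Int :=
  if s.1.contains topic.1 then
    (s.1.insert topic.1 (s.1.getD topic.1 "" ++ ", " ++ topic.2.1), s.2.1, s.2.2)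
  else
    (s.1.insert topic.1 topic.2.1, s.2.1 ++ [topic.2.2.1], s.2.2 ++ [topic.2.2.2])

def clean_topic_tuples (curr_topics : List (Int × String × Int × Int)) : List (Int × String × Int × Int) :=
  let s := curr_topics.foldl pvStepA (PySem.Dict.empty, [], [])
  pvZip4 s.1.keys s.1.values s.2.1 s.2.2

-- ===== PORT B =====
-- hand port of ', '.join(parts): exact — the parts concatenated with ', ' between them
def pvJoin : List String → String
  | [] => ""
  | p :: ps => ps.foldl (fun acc s => acc ++ ", " ++ s) p

-- B stage 1: distinct first components in first-occurrence order
def pvDistinct (l : List (Int × String × Int × Int)) : List Int :=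
  l.foldl (fun seen t => if seen.contains t.1 then seen else seen ++ [t.1]) []

-- B stage 2: a row per key; headD's default is never used (each key occurs in l,
-- matching Python's next(...) which never raises here)
def clean_topic_tuples_alt (curr_topics : List (Int × String × Int × Int)) : List (Int × String × Int × Int) :=
  (pvDistinct curr_topics).map (fun k =>
    (k, pvJoin ((curr_topics.filter (fun t => t.1 == k)).map (fun t => t.2.1)),
        ((curr_topics.filter (fun t => t.1 == k)).map (fun t => t.2.2.1)).headD 0,
        ((curr_topics.filter (fun t => t.1 == k)).map (fun t => t.2.2.2)).headD 0))

-- ===== PRECONDITION & SPEC =====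
def Spec_clean_topic_tuples (curr_topics : List (Int × String × Int × Int)) (out : List (Int × String × Int × Int)) : Prop := out = clean_topic_tuples_alt curr_topics
instance (curr_topics : List (Int × String × Int × Int)) (out : List (Int × String × Int × Int)) : Decidable (Spec_clean_topic_tuples curr_topics out) := by unfold Spec_clean_topic_tuples; infer_instance

-- ===== CLAIM (what is proved, stated in full; the proofs are below) =====
def Claim_equal_clean_topic_tuples : Prop := ∀ (curr_topics : List (Int × String × Int × Int)), Dom_clean_topic_tuples curr_topics → Spec_clean_topic_tuples curr_topics (clean_topic_tuples curr_topics)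

-- ===== LEMMAS AND PROOFS =====

-- abbreviations for B's per-key row ingredients
def pvDescs (l : List (Int × String × Int × Int)) (k : Int) : List String :=
  (l.filter (fun t => t.1 == k)).map (fun t => t.2.1)
def pvFstVis (l : List (Int × String × Int × Int)) (k : Int) : Int :=
  ((l.filter (fun t => t.1 == k)).map (fun t => t.2.2.1)).headD 0
def pvFstTid (l : List (Int × String × Int × Int)) (k : Int) : Int :=
  ((l.filter (fun t => t.1 == k)).map (fun t => t.2.2.2)).headD 0

-- the coupling invariant: A's state after processing l, expressed through B's ingredients
def pvInvA (l : List (Int × String × Int × Int))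
    (s : PySem.Dict Int String × List Int × List Int) : Prop :=
  s.1.items = (pvDistinct l).map (fun k => (k, pvJoin (pvDescs l k))) ∧
  s.2.1 = (pvDistinct l).map (pvFstVis l) ∧
  s.2.2 = (pvDistinct l).map (pvFstTid l)

theorem pvHeadD_append (xs ys : List Int) (h : xs ≠ []) : (xs ++ ys).headD 0 = xs.headD 0 := by
  cases xs with
  | nil => exact absurd rfl h
  | cons a l => rfl

theorem pvDistinct_eq_set (l : List (Int × String × Int × Int)) :
    pvDistinct l = PySem.Set.ofList (l.map Prod.fst) := by
  rw [pvDistinct, PySem.Set.ofList_eq_foldl, List.foldl_map]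
  congr 1

theorem pvDistinct_nodup (l : List (Int × String × Int × Int)) : (pvDistinct l).Nodup := by
  rw [pvDistinct_eq_set]; exact PySem.Set.nodup_ofList _

theorem pvMem_distinct (l : List (Int × String × Int × Int)) (k : Int) :
    k ∈ pvDistinct l ↔ ∃ t ∈ l, t.1 = k := by
  rw [pvDistinct_eq_set, PySem.Set.mem_ofList]
  simp

theorem pvFilter_eq_nil (l : List (Int × String × Int × Int)) (k : Int)
    (h : k ∉ pvDistinct l) : l.filter (fun t => t.1 == k) = [] := by
  rw [List.filter_eq_nil_iff]
  intro t ht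
  simp only [beq_iff_eq]
  intro hk
  exact h ((pvMem_distinct l k).mpr ⟨t, ht, hk⟩)

theorem pvFilter_ne_nil (l : List (Int × String × Int × Int)) (k : Int)
    (h : k ∈ pvDistinct l) : l.filter (fun t => t.1 == k) ≠ [] := by
  obtain ⟨t, ht, hk⟩ := (pvMem_distinct l k).mp h
  intro hnil
  have : t ∈ l.filter (fun t => t.1 == k) := List.mem_filter.mpr ⟨ht, by simp [hk]⟩
  simp [hnil] at this

theorem pvDescs_ne_nil (l : List (Int × String × Int × Int)) (k : Int)
    (h : k ∈ pvDistinct l) : pvDescs l k ≠ [] := by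
  simp only [pvDescs, ne_eq, List.map_eq_nil_iff]
  exact pvFilter_ne_nil l k h

theorem pvJoin_append (ds : List String) (d : String) (h : ds ≠ []) :
    pvJoin (ds ++ [d]) = pvJoin ds ++ ", " ++ d := by
  cases ds with
  | nil => exact absurd rfl h
  | cons p ps => simp [pvJoin, List.foldl_append]

-- effect of one more input tuple on the per-key filter
theorem pvFilter_append (l : List (Int × String × Int × Int)) (x : Int × String × Int × Int)
    (k : Int) : (l ++ [x]).filter (fun t => t.1 == k)
      = l.filter (fun t => t.1 == k) ++ (if x.1 = k then [x] else []) := by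
  rw [List.filter_append]
  congr 1
  by_cases h : x.1 = k
  · simp only [List.filter_cons, List.filter_nil]
    rw [if_pos (by simpa using h), if_pos h]
  · simp only [List.filter_cons, List.filter_nil]
    rw [if_neg (by simpa using h), if_neg h]

theorem pvDescs_app_ne (l : List (Int × String × Int × Int)) (x : Int × String × Int × Int)
    (k : Int) (h : x.1 ≠ k) : pvDescs (l ++ [x]) k = pvDescs l k := by
  simp only [pvDescs]
  rw [pvFilter_append, if_neg h, List.append_nil]

theorem pvDescs_app_self (l : List (Int × String × Int × Int)) (x : Int × String × Int × Int) :
    pvDescs (l ++ [x]) x.1 = pvDescs l x.1 ++ [x.2.1] := by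
  simp only [pvDescs]
  rw [pvFilter_append, if_pos rfl, List.map_append]
  rfl

theorem pvDescs_nil_of_not_mem (l : List (Int × String × Int × Int)) (k : Int)
    (h : k ∉ pvDistinct l) : pvDescs l k = [] := by
  simp only [pvDescs]
  rw [pvFilter_eq_nil l k h]
  rfl

theorem pvFstVis_app_ne (l : List (Int × String × Int × Int)) (x : Int × String × Int × Int)
    (k : Int) (h : x.1 ≠ k) : pvFstVis (l ++ [x]) k = pvFstVis l k := by
  simp only [pvFstVis]
  rw [pvFilter_append, if_neg h, List.append_nil]

theorem pvFstVis_app_self_mem (l : List (Int × String × Int × Int)) (x : Int × String × Int × Int)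
    (h : x.1 ∈ pvDistinct l) : pvFstVis (l ++ [x]) x.1 = pvFstVis l x.1 := by
  simp only [pvFstVis]
  rw [pvFilter_append, if_pos rfl, List.map_append, pvHeadD_append _ _ (by
    simp only [ne_eq, List.map_eq_nil_iff]
    exact pvFilter_ne_nil l _ h)]

theorem pvFstVis_app_self_new (l : List (Int × String × Int × Int)) (x : Int × String × Int × Int)
    (h : x.1 ∉ pvDistinct l) : pvFstVis (l ++ [x]) x.1 = x.2.2.1 := by
  simp only [pvFstVis]
  rw [pvFilter_append, if_pos rfl, pvFilter_eq_nil l _ h]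
  rfl

theorem pvFstTid_app_ne (l : List (Int × String × Int × Int)) (x : Int × String × Int × Int)
    (k : Int) (h : x.1 ≠ k) : pvFstTid (l ++ [x]) k = pvFstTid l k := by
  simp only [pvFstTid]
  rw [pvFilter_append, if_neg h, List.append_nil]

theorem pvFstTid_app_self_mem (l : List (Int × String × Int × Int)) (x : Int × String × Int × Int)
    (h : x.1 ∈ pvDistinct l) : pvFstTid (l ++ [x]) x.1 = pvFstTid l x.1 := by
  simp only [pvFstTid]
  rw [pvFilter_append, if_pos rfl, List.map_append, pvHeadD_append _ _ (by
    simp only [ne_eq, List.map_eq_nil_iff]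
    exact pvFilter_ne_nil l _ h)]

theorem pvFstTid_app_self_new (l : List (Int × String × Int × Int)) (x : Int × String × Int × Int)
    (h : x.1 ∉ pvDistinct l) : pvFstTid (l ++ [x]) x.1 = x.2.2.2 := by
  simp only [pvFstTid]
  rw [pvFilter_append, if_pos rfl, pvFilter_eq_nil l _ h]
  rfl

theorem pvDistinct_append (l : List (Int × String × Int × Int)) (x : Int × String × Int × Int) :
    pvDistinct (l ++ [x])
      = if (pvDistinct l).contains x.1 then pvDistinct l else pvDistinct l ++ [x.1] := by
  simp [pvDistinct, List.foldl_append]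

-- pvZip4 of four maps over the same key list is a map of the 4-tuple
theorem pvZip4_map (L : List Int) (f1 : Int → Int) (f2 : Int → String) (f3 f4 : Int → Int) :
    pvZip4 (L.map f1) (L.map f2) (L.map f3) (L.map f4)
      = L.map (fun k => (f1 k, f2 k, f3 k, f4 k)) := by
  induction L with
  | nil => rfl
  | cons k ks ih => simp [pvZip4, ih]

theorem pvInvA_step (l : List (Int × String × Int × Int)) (x : Int × String × Int × Int)
    (s : PySem.Dict Int String × List Int × List Int) (h : pvInvA l s) :
    pvInvA (l ++ [x]) (pvStepA s x) := by
  obtain ⟨hd, hv, ht⟩ := h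
  have hkeys : s.1.keys = pvDistinct l := by
    show s.1.items.map Prod.fst = _
    rw [hd, List.map_map]
    exact List.map_id' _
  have hknd : s.1.keys.Nodup := by rw [hkeys]; exact pvDistinct_nodup l
  have hcont : s.1.contains x.1 = (pvDistinct l).contains x.1 := by
    rw [PySem.Dict.contains_eq_decide_mem_keys, hkeys]
    simp
  by_cases hc : x.1 ∈ pvDistinct l
  · -- key already present: A rewrites the dict value only
    have hcB : (pvDistinct l).contains x.1 = true := by simpa using hc
    have hcA : s.1.contains x.1 = true := by rw [hcont]; exact hcB
    have hdist : pvDistinct (l ++ [x]) = pvDistinct l := by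
      rw [pvDistinct_append, if_pos hcB]
    have hgetd : s.1.getD x.1 "" = pvJoin (pvDescs l x.1) := by
      apply PySem.Dict.getD_of_mem_items (d := s.1) _ hknd
      rw [hd]
      exact List.mem_map.mpr ⟨x.1, hc, rfl⟩
    rw [show pvStepA s x = (s.1.insert x.1 (s.1.getD x.1 "" ++ ", " ++ x.2.1), s.2.1, s.2.2) from
      by simp [pvStepA, hcA]]
    refine ⟨?_, ?_, ?_⟩
    · show (s.1.insert x.1 (s.1.getD x.1 "" ++ ", " ++ x.2.1)).items = _
      rw [PySem.Dict.items_insert_of_contains _ _ hcA, hd, List.map_map, hdist]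
      apply List.map_congr_left
      intro k hk
      simp only [Function.comp_apply]
      by_cases hkx : k = x.1
      · rw [hkx, if_pos (beq_self_eq_true x.1), hgetd,
          ← pvJoin_append _ _ (pvDescs_ne_nil l x.1 hc), ← pvDescs_app_self]
      · rw [if_neg (by simpa using hkx),
          pvDescs_app_ne l x k (fun h' => hkx h'.symm)]
    · show s.2.1 = _
      rw [hv, hdist]
      apply List.map_congr_left
      intro k hk
      by_cases hkx : k = x.1
      · rw [hkx, pvFstVis_app_self_mem l x hc]
      · rw [pvFstVis_app_ne l x k (fun h' => hkx h'.symm)]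
    · show s.2.2 = _
      rw [ht, hdist]
      apply List.map_congr_left
      intro k hk
      by_cases hkx : k = x.1
      · rw [hkx, pvFstTid_app_self_mem l x hc]
      · rw [pvFstTid_app_ne l x k (fun h' => hkx h'.symm)]
  · -- new key: both the dict and the parallel lists append
    have hcB : (pvDistinct l).contains x.1 = false := by simpa using hc
    have hcA : s.1.contains x.1 = false := by rw [hcont]; exact hcB
    have hdist : pvDistinct (l ++ [x]) = pvDistinct l ++ [x.1] := by
      rw [pvDistinct_append, if_neg (by simpa using hc)]
    have holdk : ∀ k ∈ pvDistinct l, x.1 ≠ k := fun k hk he => hc (he ▸ hk)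
    rw [show pvStepA s x = (s.1.insert x.1 x.2.1, s.2.1 ++ [x.2.2.1], s.2.2 ++ [x.2.2.2]) from
      by simp [pvStepA, hcA]]
    refine ⟨?_, ?_, ?_⟩
    · show (s.1.insert x.1 x.2.1).items = _
      rw [PySem.Dict.items_insert_of_not_contains _ _ hcA, hd, hdist, List.map_append]
      congr 1
      · apply List.map_congr_left
        intro k hk
        rw [pvDescs_app_ne l x k (holdk k hk)]
      · rw [List.map_cons, List.map_nil, pvDescs_app_self, pvDescs_nil_of_not_mem l x.1 hc,
          List.nil_append]
        rfl
    · show s.2.1 ++ [x.2.2.1] = _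
      rw [hv, hdist, List.map_append]
      congr 1
      · apply List.map_congr_left
        intro k hk
        rw [pvFstVis_app_ne l x k (holdk k hk)]
      · rw [List.map_cons, List.map_nil, pvFstVis_app_self_new l x hc]
    · show s.2.2 ++ [x.2.2.2] = _
      rw [ht, hdist, List.map_append]
      congr 1
      · apply List.map_congr_left
        intro k hk
        rw [pvFstTid_app_ne l x k (holdk k hk)]
      · rw [List.map_cons, List.map_nil, pvFstTid_app_self_new l x hc]

theorem pvInvA_all (l : List (Int × String × Int × Int)) :
    pvInvA l (l.foldl pvStepA (PySem.Dict.empty, [], [])) := by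
  induction l using List.reverseRecOn with
  | nil =>
    refine ⟨?_, rfl, rfl⟩
    simp [PySem.Dict.empty, pvDistinct]
  | append_singleton l x ih =>
    rw [List.foldl_append]
    exact pvInvA_step l x _ ih

-- ===== VERDICT (by name: the statement is the Claim_ definition above) =====
theorem clean_topic_tuples_spec : Claim_equal_clean_topic_tuples := by
  intro curr_topics _
  show clean_topic_tuples curr_topics = clean_topic_tuples_alt curr_topics
  obtain ⟨hd, hv, ht⟩ := pvInvA_all curr_topics
  show pvZip4 (curr_topics.foldl pvStepA (PySem.Dict.empty, [], [])).1.keys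
      (curr_topics.foldl pvStepA (PySem.Dict.empty, [], [])).1.values
      (curr_topics.foldl pvStepA (PySem.Dict.empty, [], [])).2.1
      (curr_topics.foldl pvStepA (PySem.Dict.empty, [], [])).2.2
    = clean_topic_tuples_alt curr_topics
  have hkeys : (curr_topics.foldl pvStepA (PySem.Dict.empty, [], [])).1.keys
      = (pvDistinct curr_topics).map id := by
    show (curr_topics.foldl pvStepA (PySem.Dict.empty, [], [])).1.items.map Prod.fst = _
    rw [hd, List.map_map]; rfl
  have hvals : (curr_topics.foldl pvStepA (PySem.Dict.empty, [], [])).1.values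
      = (pvDistinct curr_topics).map (fun k => pvJoin (pvDescs curr_topics k)) := by
    show (curr_topics.foldl pvStepA (PySem.Dict.empty, [], [])).1.items.map Prod.snd = _
    rw [hd, List.map_map]; rfl
  rw [hkeys, hvals, hv, ht, pvZip4_map]
  rfl
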